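-- pv_equiv track=rewrite | github.com/chenwenyu1014/csr | service/windows/preprocessing/preprocessing_function/excel/excel_pipeline.py | _is_single_cell_row
-- ===== SOURCE A (Python) =====
-- from typing import Dict, Any, List, Tuple, Optional
--
-- def _is_single_cell_row(row: List[str], placeholder: str = "...") -> bool:
--     """
--     判断是否为单单元格行（整行只有第一个单元格有内容，其余全是占位符）
--     """
--     if not row:
--         return False
--
--     first_cell = str(row[0]).strip() if row[0] else ""
--     if not first_cell or first_cell == placeholder:
--         return False
--
--     # 检查其余单元格是否全是占位符
--     for cell in row[1:]:
--         cell_val = str(cell).strip() if cell else ""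
--         if cell_val and cell_val != placeholder:
--             return False
--
--     return True
-- ===== SOURCE B (Python) =====
-- def _is_single_cell_row(row, placeholder="..."):
--     def meaningful(c):
--         v = str(c).strip() if c else ""
--         return v != "" and v != placeholder
--     count = sum(map(meaningful, row))
--     return count == 1 and meaningful(row[0])
-- ===== Notes on version B (the rewrite author's own statement) =====
-- stated objective: alternative
-- what changed: Replaces A's first-cell guard plus early-exit scan over row[1:] with a counting algorithm: sum the meaningful-cell indicator over the whole row and return count == 1 together with a first-cell meaningfulness check.
import Mathlib
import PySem

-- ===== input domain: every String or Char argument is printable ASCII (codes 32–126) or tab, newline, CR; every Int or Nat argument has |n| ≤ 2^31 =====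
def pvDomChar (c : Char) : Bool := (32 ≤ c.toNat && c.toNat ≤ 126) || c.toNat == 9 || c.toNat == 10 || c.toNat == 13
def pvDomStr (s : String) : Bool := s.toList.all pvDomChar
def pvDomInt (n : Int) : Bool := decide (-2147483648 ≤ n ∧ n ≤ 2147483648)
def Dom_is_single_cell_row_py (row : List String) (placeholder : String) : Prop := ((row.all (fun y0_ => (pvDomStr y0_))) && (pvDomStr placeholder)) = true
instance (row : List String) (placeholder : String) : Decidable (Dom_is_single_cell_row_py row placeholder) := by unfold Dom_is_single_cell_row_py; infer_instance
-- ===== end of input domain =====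

-- B replaces A's first-cell guard + early-exit tail scan with a counting algorithm:
-- sum the meaningful-cell indicator over the whole row and test count == 1 plus a
-- first-cell check (objective: alternative decomposition, same cost).

-- ===== PORT A =====
-- the 'for cell in row[1:]' early-exit loop of A
def pvLoopA (placeholder : String) : List String → Bool
  | [] => true
  | c :: cs =>
    let cell_val := if c ≠ "" then PySem.Str.strip c else ""
    if cell_val ≠ "" ∧ cell_val ≠ placeholder then false else pvLoopA placeholder cs

def is_single_cell_row_py (row : List String) (placeholder : String) : Bool :=
  match row with
  | [] => false
  | r0 :: rest =>
    let first_cell := if r0 ≠ "" then PySem.Str.strip r0 else ""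
    if first_cell = "" ∨ first_cell = placeholder then false
    else pvLoopA placeholder rest

-- ===== PORT B =====
-- Source B's helper 'meaningful'
def pvMeaningful (placeholder c : String) : Bool :=
  let v := if c ≠ "" then PySem.Str.strip c else ""
  v ≠ "" && v ≠ placeholder

def is_single_cell_row_py_alt (row : List String) (placeholder : String) : Bool :=
  -- count = sum(map(meaningful, row))  (Python sums booleans as integers)
  let count : Int := (row.map (fun c => if pvMeaningful placeholder c then (1:Int) else 0)).sum
  -- 'count == 1 and meaningful(row[0])'; row[0] is only reached when count == 1 (row nonempty)
  if count = 1 then pvMeaningful placeholder ((PySem.List.pyGet? row 0).getD "") else false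

-- ===== PRECONDITION & SPEC =====
def Spec_is_single_cell_row_py (row : List String) (placeholder : String) (out : Bool) : Prop := out = is_single_cell_row_py_alt row placeholder
instance (row : List String) (placeholder : String) (out : Bool) : Decidable (Spec_is_single_cell_row_py row placeholder out) := by unfold Spec_is_single_cell_row_py; infer_instance

-- ===== CLAIM =====
def Claim_equal_is_single_cell_row_py : Prop := ∀ (row : List String) (placeholder : String), Dom_is_single_cell_row_py row placeholder → Spec_is_single_cell_row_py row placeholder (is_single_cell_row_py row placeholder)

-- ===== LEMMAS AND PROOFS =====

-- the indicator sum is nonnegative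
theorem pvSum_nonneg (placeholder : String) (cs : List String) :
    0 ≤ (cs.map (fun c => if pvMeaningful placeholder c then (1:Int) else 0)).sum := by
  induction cs with
  | nil => simp
  | cons c cs ih =>
    simp only [List.map_cons, List.sum_cons]
    split <;> omega

-- pvMeaningful, unfolded to the condition A's branches test
theorem pvMeaningful_eq_true_iff (placeholder c : String) :
    pvMeaningful placeholder c = true ↔
      ((if c ≠ "" then PySem.Str.strip c else "") ≠ "" ∧
       (if c ≠ "" then PySem.Str.strip c else "") ≠ placeholder) := by
  simp only [pvMeaningful, Bool.and_eq_true, decide_eq_true_eq]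

theorem pvIfTrue : (if (true:Bool) = true then (1:Int) else 0) = 1 := by simp
theorem pvIfFalse : (if (false:Bool) = true then (1:Int) else 0) = 0 := by simp

-- A's tail loop returns true exactly when B's indicator sum over the tail is zero
theorem pvLoopA_iff_sum_zero (placeholder : String) (cs : List String) :
    pvLoopA placeholder cs = true ↔
      (cs.map (fun c => if pvMeaningful placeholder c then (1:Int) else 0)).sum = 0 := by
  induction cs with
  | nil => simp [pvLoopA]
  | cons c cs ih =>
    have hnn := pvSum_nonneg placeholder cs
    simp only [List.map_cons, List.sum_cons]
    show (if (if c ≠ "" then PySem.Str.strip c else "") ≠ "" ∧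
             (if c ≠ "" then PySem.Str.strip c else "") ≠ placeholder
          then false else pvLoopA placeholder cs) = true ↔ _
    by_cases h : (if c ≠ "" then PySem.Str.strip c else "") ≠ "" ∧
                 (if c ≠ "" then PySem.Str.strip c else "") ≠ placeholder
    · have hm : pvMeaningful placeholder c = true := (pvMeaningful_eq_true_iff placeholder c).mpr h
      rw [if_pos h, hm, pvIfTrue]
      constructor
      · intro hfalse; cases hfalse
      · intro hsum; omega
    · have hm : pvMeaningful placeholder c = false := by
        rw [← Bool.not_eq_true, pvMeaningful_eq_true_iff]; exact h
      rw [if_neg h, hm, pvIfFalse]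
      simpa using ih

theorem is_single_cell_row_py_spec : Claim_equal_is_single_cell_row_py := by
  intro row placeholder _
  unfold Spec_is_single_cell_row_py
  cases row with
  | nil =>
    simp [is_single_cell_row_py, is_single_cell_row_py_alt]
  | cons r0 rest =>
    have hnn := pvSum_nonneg placeholder rest
    simp only [is_single_cell_row_py, is_single_cell_row_py_alt, List.map_cons, List.sum_cons,
      PySem.List.pyGet?_zero_cons, Option.getD_some]
    by_cases h0 : (if r0 ≠ "" then PySem.Str.strip r0 else "") ≠ "" ∧
                  (if r0 ≠ "" then PySem.Str.strip r0 else "") ≠ placeholder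
    · -- first cell meaningful: A = tail loop, B = (1 + tail sum = 1) && true
      have hm : pvMeaningful placeholder r0 = true := (pvMeaningful_eq_true_iff placeholder r0).mpr h0
      have hA : ¬ ((if r0 ≠ "" then PySem.Str.strip r0 else "") = "" ∨
                   (if r0 ≠ "" then PySem.Str.strip r0 else "") = placeholder) := by
        rcases h0 with ⟨h1, h2⟩; rintro (h | h); exacts [h1 h, h2 h]
      rw [if_neg hA, hm, pvIfTrue]
      by_cases hs : (rest.map (fun c => if pvMeaningful placeholder c then (1:Int) else 0)).sum = 0
      · rw [if_pos (show (1:Int) + (rest.map (fun c => if pvMeaningful placeholder c then (1:Int) else 0)).sum = 1 by omega)]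
        simp [(pvLoopA_iff_sum_zero placeholder rest).mpr hs]
      · rw [if_neg (show ¬ (1:Int) + (rest.map (fun c => if pvMeaningful placeholder c then (1:Int) else 0)).sum = 1 by omega)]
        rw [← Bool.not_eq_true, pvLoopA_iff_sum_zero]
        exact hs
    · -- first cell not meaningful: A returns false, B's first check fails
      have hm : pvMeaningful placeholder r0 = false := by
        rw [← Bool.not_eq_true, pvMeaningful_eq_true_iff]; exact h0
      have hA : (if r0 ≠ "" then PySem.Str.strip r0 else "") = "" ∨
                (if r0 ≠ "" then PySem.Str.strip r0 else "") = placeholder := by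
        by_contra hc; push_neg at hc; exact h0 hc
      rw [if_pos hA, hm, pvIfFalse]
      split
      · rfl
      · rfl
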